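-- pv_equiv track=rewrite | github.com/leocjj/job_shop_scheduling_solver | jss_v0.5.py | add_execution_times
-- ===== SOURCE A (Python) =====
-- def add_execution_times(jobs_data):
--     return [
--         [
--             [machine, duration, sum(duration for _, duration in job[:i])]
--             for i, (machine, duration) in enumerate(job)
--         ]
--         for job in jobs_data
--     ]
-- ===== SOURCE B (Python) =====
-- def add_execution_times(jobs_data):
--     result = []
--     for job in jobs_data:
--         acc = 0
--         rows = []
--         for machine, duration in job:
--             rows.append([machine, duration, acc])
--             acc += duration
--         result.append(rows)
--     return result
-- ===== Notes on version B (the rewrite author's own statement) =====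
-- stated objective: faster
-- what changed: Replaces the per-element re-summation of the slice job[:i] by a single pass per job with a running-sum accumulator.
import Mathlib
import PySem

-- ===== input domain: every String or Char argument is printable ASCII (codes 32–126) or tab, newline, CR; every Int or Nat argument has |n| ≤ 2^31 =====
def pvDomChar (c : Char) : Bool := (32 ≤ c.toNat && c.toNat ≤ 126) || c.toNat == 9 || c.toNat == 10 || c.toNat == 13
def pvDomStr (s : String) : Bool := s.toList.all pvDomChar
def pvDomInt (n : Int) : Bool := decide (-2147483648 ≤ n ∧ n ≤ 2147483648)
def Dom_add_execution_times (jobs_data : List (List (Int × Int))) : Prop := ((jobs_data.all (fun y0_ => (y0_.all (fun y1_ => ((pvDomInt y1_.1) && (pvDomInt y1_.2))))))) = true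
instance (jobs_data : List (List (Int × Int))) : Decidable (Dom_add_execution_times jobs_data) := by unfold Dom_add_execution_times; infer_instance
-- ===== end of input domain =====

-- B replaces A's per-element re-summation of job[:i] by one pass per job with a running-sum accumulator (objective: faster).

-- ===== PORT A =====
-- sum(duration for _, duration in job[:i]) : map the durations of the slice, then sum
def add_execution_times (jobs_data : List (List (Int × Int))) : List (List (List Int)) :=
  jobs_data.map (fun job =>
    (PySem.List.enumerate job 0).map (fun p =>
      [p.2.1, p.2.2, ((PySem.List.slice job none (some p.1)).map (fun q => q.2)).sum]))

-- ===== PORT B =====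
-- inner loop of B: rows accumulated structurally, acc is the running sum
def aetRows (acc : Int) : List (Int × Int) → List (List Int)
  | [] => []
  | (machine, duration) :: rest => [machine, duration, acc] :: aetRows (acc + duration) rest

def add_execution_times_alt (jobs_data : List (List (Int × Int))) : List (List (List Int)) :=
  jobs_data.map (fun job => aetRows 0 job)

-- ===== PRECONDITION & SPEC =====
def Spec_add_execution_times (jobs_data : List (List (Int × Int))) (out : List (List (List Int))) : Prop := out = add_execution_times_alt jobs_data
instance (jobs_data : List (List (Int × Int))) (out : List (List (List Int))) : Decidable (Spec_add_execution_times jobs_data out) := by unfold Spec_add_execution_times; infer_instance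

-- ===== CLAIM (what is proved, stated in full; the proofs are below) =====
def Claim_equal_add_execution_times : Prop := ∀ (jobs_data : List (List (Int × Int))), Dom_add_execution_times jobs_data → Spec_add_execution_times jobs_data (add_execution_times jobs_data)

-- ===== LEMMAS AND PROOFS =====

-- per-job invariant: with `pre` already consumed, A's comprehension over the remaining
-- `tail` (indices starting at pre.length, slices taken from the whole job pre ++ tail)
-- equals B's loop started at acc = sum of the durations of pre
theorem aet_job_inv (tail pre : List (Int × Int)) :
    (PySem.List.enumerate tail (pre.length : Int)).map (fun p =>
        [p.2.1, p.2.2, ((PySem.List.slice (pre ++ tail) none (some p.1)).map (fun q => q.2)).sum])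
      = aetRows ((pre.map (fun q => q.2)).sum) tail := by
  induction tail generalizing pre with
  | nil => simp [PySem.List.enumerate_nil, aetRows]
  | cons hd rest ih =>
    obtain ⟨m, d⟩ := hd
    rw [PySem.List.enumerate_cons]
    simp only [List.map_cons, aetRows]
    refine List.cons_eq_cons.mpr ⟨?_, ?_⟩
    · rw [PySem.List.slice_to_natCast]
      simp
    · have h := ih (pre ++ [(m, d)])
      have hl : ((pre ++ [(m, d)]).length : Int) = (pre.length : Int) + 1 := by
        simp
      rw [hl] at h
      rw [List.append_assoc] at h
      simpa using h

theorem add_execution_times_eq (jobs_data : List (List (Int × Int))) :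
    add_execution_times jobs_data = add_execution_times_alt jobs_data := by
  unfold add_execution_times add_execution_times_alt
  refine List.map_congr_left (fun job _ => ?_)
  have h := aet_job_inv job []
  simpa using h

-- ===== VERDICT (by name: the statement is the Claim_ definition above) =====
theorem add_execution_times_spec : Claim_equal_add_execution_times := by
  intro jobs_data _
  unfold Spec_add_execution_times
  exact add_execution_times_eq jobs_data
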